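-- pv_equiv track=rewrite | github.com/xiaolongtuan-yuan/janus_impliment | colections_cul.py | split_into_disjoint_sets
-- ===== SOURCE A (Python) =====
-- from itertools import combinations
--
-- def split_into_disjoint_sets(sets):
--     # 将EPGs拆分为不相交集合，同时记录他们与原始EPGs的关联，用于后面的约束复制
--     all_elements = set().union(*sets)
--     disjoint_sets = []
--
--     # 找到所有可能的交集
--     all_intersections = []
--     for i in reversed(range(1, len(sets) + 1)):
--         for combo in combinations(sets, i):
--             intersect = set.intersection(*combo)
--             if intersect:
--                 all_intersections.append(intersect)
--
--     # 去重并确保每个元素只出现在一个集合中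
--     used_elements = set()
--     for intersect in all_intersections:
--         intersect -= used_elements
--         if intersect:
--             disjoint_sets.append(intersect)
--             used_elements.update(intersect)
--
--     return disjoint_sets
-- ===== SOURCE B (Python) =====
-- def split_into_disjoint_sets(sets):
--     # Group elements by their membership signature (the tuple of indices of the
--     # input sets containing them); emit groups by signature size descending,
--     # then lexicographic order of the index tuples.
--     sig = {}
--     for i, s in enumerate(sets):
--         for e in s:
--             sig.setdefault(e, []).append(i)
--     groups = {}
--     for e, idxs in sig.items():
--         groups.setdefault(tuple(idxs), []).append(e)
--     order = sorted(groups.keys(), key=lambda t: (-len(t),) + t)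
--     return [set(groups[t]) for t in order]
-- ===== Notes on version B (the rewrite author's own statement) =====
-- stated objective: faster
-- what changed: Instead of intersecting all 2^n combinations of the input sets, B scans each element once to build its membership signature (tuple of set indices), groups elements by signature, and emits the groups sorted by signature size descending then lexicographic index order — the exact order A's combination enumeration produces.
import Mathlib
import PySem

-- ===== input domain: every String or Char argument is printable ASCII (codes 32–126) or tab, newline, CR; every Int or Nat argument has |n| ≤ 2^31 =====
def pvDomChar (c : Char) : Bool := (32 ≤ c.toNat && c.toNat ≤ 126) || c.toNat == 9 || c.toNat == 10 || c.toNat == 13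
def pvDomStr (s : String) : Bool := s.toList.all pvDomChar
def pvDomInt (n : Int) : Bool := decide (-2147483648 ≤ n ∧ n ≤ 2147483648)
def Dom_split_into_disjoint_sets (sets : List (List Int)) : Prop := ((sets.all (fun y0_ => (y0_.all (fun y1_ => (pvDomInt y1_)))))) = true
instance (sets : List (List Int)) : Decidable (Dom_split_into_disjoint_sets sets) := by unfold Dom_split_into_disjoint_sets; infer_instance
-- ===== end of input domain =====

-- B replaces A's exponential scan over all 2^n set combinations by a single pass that groups
-- elements by membership signature, emitting groups sorted by (size desc, index-lex) — A's order.

-- ===== PORT A =====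
-- helper for 'set.intersection(*combo)' (combo nonempty; result in the first set's order)
def pvInterAll (combo : List (List Int)) : PySem.Set Int :=
  match combo with
  | [] => PySem.Set.empty
  | s :: rest => rest.foldl (fun acc t => PySem.Set.inter acc (PySem.Set.ofList t)) (PySem.Set.ofList s)

def split_into_disjoint_sets (sets : List (List Int)) : List (List Int) :=
  let _all_elements : PySem.Set Int :=
    sets.foldl (fun acc s => PySem.Set.union acc s) PySem.Set.empty
  let all_intersections : List (List Int) :=
    ((PySem.List.pyRange 1 (PySem.List.len sets + 1) 1).reverse).foldl (fun acc i =>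
      (PySem.List.combinations sets i.toNat).foldl (fun acc combo =>
        let intersect := pvInterAll combo
        if intersect ≠ [] then acc ++ [intersect] else acc) acc) []
  (all_intersections.foldl (fun (p : List (List Int) × PySem.Set Int) intersect =>
      let intersect2 := PySem.Set.diff intersect p.2
      if intersect2 ≠ [] then (p.1 ++ [intersect2], PySem.Set.update p.2 intersect2) else p)
    ([], PySem.Set.empty)).1

-- ===== PORT B =====
def split_into_disjoint_sets_alt (sets : List (List Int)) : List (List Int) :=
  let sig : PySem.Dict Int (List Int) :=
    (PySem.List.enumerate sets).foldl (fun d is =>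
      (PySem.Set.ofList is.2).foldl (fun d e => d.modify e [] (fun v => v ++ [is.1])) d)
      (PySem.Dict.mk [])
  let groups : PySem.Dict (List Int) (List Int) :=
    sig.items.foldl (fun g p => g.modify p.2 [] (fun v => v ++ [p.1])) (PySem.Dict.mk [])
  let order : List (List Int) :=
    PySem.List.sorted groups.keys (fun t => (-(PySem.List.len t)) :: t)
  order.map (fun t => PySem.Set.ofList (groups.getD t []))

-- ===== PRECONDITION & SPEC =====
def Spec_split_into_disjoint_sets (sets : List (List Int)) (out : List (List Int)) : Prop := out = split_into_disjoint_sets_alt sets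
instance (sets : List (List Int)) (out : List (List Int)) : Decidable (Spec_split_into_disjoint_sets sets out) := by unfold Spec_split_into_disjoint_sets; infer_instance

-- ===== CLAIM (what is proved, stated in full; the proofs are below) =====
def Claim_equal_split_into_disjoint_sets : Prop := ∀ (sets : List (List Int)), Dom_split_into_disjoint_sets sets → Spec_split_into_disjoint_sets sets (split_into_disjoint_sets sets)

-- ===== LEMMAS AND PROOFS =====

-- ---- canonical notions used by the proof ----

-- sets[i] for an in-range index
def pvGetI (sets : List (List Int)) (i : Int) : List Int := PySem.List.pyGetD sets i []

-- membership signature of an element: the (ascending) indices of the sets containing it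
def pvSigFrom (i : Int) (r : List (List Int)) (e : Int) : List Int :=
  match r with
  | [] => []
  | s :: r => (if e ∈ s then [i] else []) ++ pvSigFrom (i + 1) r e

def pvSig (sets : List (List Int)) (e : Int) : List Int := pvSigFrom 0 sets e

-- the descending list [n, n-1, ..., 1]
def pvDesc (n : Nat) : List Int :=
  match n with
  | 0 => []
  | k + 1 => ((k + 1 : Nat) : Int) :: pvDesc k

def pvR (sets : List (List Int)) : List Int := PySem.List.pyRange 0 (PySem.List.len sets) 1

-- all index combinations in A's enumeration order: size descending, lexicographic within a size
def pvCombosFrom (sets : List (List Int)) (k : Nat) : List (List Int) :=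
  (pvDesc k).flatMap (fun i => PySem.List.combinations (pvR sets) i.toNat)

def pvCombosAll (sets : List (List Int)) : List (List Int) := pvCombosFrom sets sets.length

-- the elements whose signature contains I, in the order of set(sets[I.head])
def pvW (sets : List (List Int)) (I : List Int) : List Int :=
  (PySem.Set.ofList (pvGetI sets (I.headD 0))).filter (fun e => decide (I ⊆ pvSig sets e))

-- the group of signature S, in the order of set(sets[S.head])
def pvG (sets : List (List Int)) (S : List Int) : List Int :=
  (PySem.Set.ofList (pvGetI sets (S.headD 0))).filter (fun e => pvSig sets e == S)

-- B's sort key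
def pvKey (t : List Int) : List Int := (-(PySem.List.len t)) :: t

-- ---- facts about signatures ----

lemma pvSigFrom_mem (i : Int) (r : List (List Int)) (e j : Int) :
    j ∈ pvSigFrom i r e ↔ ∃ k : Nat, ∃ h : k < r.length, j = i + k ∧ e ∈ r[k] := by
  induction r generalizing i with
  | nil => simp [pvSigFrom]
  | cons s r ih =>
    simp only [pvSigFrom, List.mem_append, ih]
    constructor
    · rintro (h | ⟨k, hk, rfl, hm⟩)
      · by_cases hes : e ∈ s
        · simp only [hes, if_true, List.mem_singleton] at h
          exact ⟨0, by simp, by omega, by simpa using hes⟩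
        · simp [hes] at h
      · exact ⟨k + 1, by simpa using hk, by push_cast; ring, by simpa using hm⟩
    · rintro ⟨k, hk, rfl, hm⟩
      cases k with
      | zero => left; simp at hm; simp [hm]
      | succ k =>
        right
        exact ⟨k, by simpa using hk, by push_cast; ring, by simpa using hm⟩

lemma pvSigFrom_lb (i : Int) (r : List (List Int)) (e : Int) :
    ∀ j ∈ pvSigFrom i r e, i ≤ j := by
  intro j hj
  rw [pvSigFrom_mem] at hj
  obtain ⟨k, hk, rfl, -⟩ := hj
  omega

lemma pvSigFrom_pairwise (i : Int) (r : List (List Int)) (e : Int) :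
    (pvSigFrom i r e).Pairwise (· < ·) := by
  induction r generalizing i with
  | nil => simp [pvSigFrom]
  | cons s r ih =>
    simp only [pvSigFrom]
    split
    · refine List.Pairwise.cons ?_ (ih (i + 1))
      intro j hj
      have := pvSigFrom_lb (i + 1) r e j hj
      omega
    · simpa using ih (i + 1)

lemma pvSig_mem (sets : List (List Int)) (e j : Int) :
    j ∈ pvSig sets e ↔ 0 ≤ j ∧ j < (sets.length : Int) ∧ e ∈ pvGetI sets j := by
  rw [pvSig, pvSigFrom_mem]
  constructor
  · rintro ⟨k, hk, rfl, hm⟩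
    refine ⟨by omega, by omega, ?_⟩
    rw [pvGetI]
    rw [show (0 : Int) + k = (k : Int) by ring, PySem.List.pyGetD_natCast]
    simpa [List.getD_eq_getElem?_getD, List.getElem?_eq_getElem hk] using hm
  · rintro ⟨h0, hlt, hm⟩
    refine ⟨j.toNat, by omega, by omega, ?_⟩
    rw [pvGetI] at hm
    rw [PySem.List.pyGetD_eq_getElem sets [] h0 (by simpa using hlt)] at hm
    exact hm

lemma pvSigFrom_length (i : Int) (r : List (List Int)) (e : Int) :
    (pvSigFrom i r e).length ≤ r.length := by
  induction r generalizing i with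
  | nil => simp [pvSigFrom]
  | cons s r ih =>
    simp only [pvSigFrom, List.length_append, List.length_cons]
    have := ih (i + 1)
    split <;> simp <;> omega

lemma pvSig_ne_nil_iff (sets : List (List Int)) (e : Int) :
    pvSig sets e ≠ [] ↔ e ∈ sets.flatten := by
  rw [← List.isEmpty_eq_false_iff, ← Bool.not_eq_true, List.isEmpty_iff_length_eq_zero]
  constructor
  · intro h
    have : ∃ j, j ∈ pvSig sets e := by
      cases hs : pvSig sets e with
      | nil => rw [hs] at h; simp at h
      | cons a t => exact ⟨a, List.mem_cons_self⟩
    obtain ⟨j, hj⟩ := this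
    rw [pvSig_mem] at hj
    obtain ⟨h0, hlt, hm⟩ := hj
    rw [List.mem_flatten]
    refine ⟨pvGetI sets j, ?_, hm⟩
    rw [pvGetI]
    exact PySem.List.pyGetD_mem sets [] (by simp [PySem.Raise.InRange]; omega)
  · intro h hlen
    rw [List.mem_flatten] at h
    obtain ⟨s, hs, hm⟩ := h
    obtain ⟨k, hk, rfl⟩ := List.mem_iff_getElem.mp hs
    have : (k : Int) ∈ pvSig sets e := by
      rw [pvSig_mem]
      refine ⟨by omega, by omega, ?_⟩
      rw [pvGetI, PySem.List.pyGetD_natCast]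
      simpa [List.getD_eq_getElem?_getD, List.getElem?_eq_getElem hk] using hm
    have := List.length_pos_of_mem this
    omega

lemma pvSig_pairwise (sets : List (List Int)) (e : Int) : (pvSig sets e).Pairwise (· < ·) :=
  pvSigFrom_pairwise 0 sets e

-- ---- sorted sublists of a range ----

lemma pvSublist_pyRange (l : List Int) (a b : Int) (hp : l.Pairwise (· < ·))
    (hm : ∀ x ∈ l, a ≤ x ∧ x < b) : l.Sublist (PySem.List.pyRange a b) := by
  generalize hn : (b - a).toNat = n
  induction n generalizing a l with
  | zero =>
    cases l with
    | nil => simp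
    | cons x t =>
      have := hm x List.mem_cons_self
      omega
  | succ n ih =>
    cases l with
    | nil => simp
    | cons x t =>
      have hx := hm x List.mem_cons_self
      have hab : a < b := by omega
      rw [PySem.List.pyRange_one_cons hab]
      by_cases hxa : x = a
      · subst hxa
        refine List.Sublist.cons₂ _ (ih t (x + 1) hp.of_cons ?_ (by omega))
        intro y hy
        have hxy := List.rel_of_pairwise_cons hp hy
        have := (hm y (List.mem_cons_of_mem _ hy)).2
        omega
      · refine List.Sublist.cons _ (ih (x :: t) (a + 1) hp ?_ (by omega))
        intro y hy
        rcases List.mem_cons.mp hy with rfl | hy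
        · omega
        · have hxy := List.rel_of_pairwise_cons hp hy
          have := (hm y (List.mem_cons_of_mem _ hy)).2
          omega

lemma pvEq_of_subset_sorted (I S : List Int) (hI : I.Pairwise (· < ·)) (hS : S.Pairwise (· < ·))
    (hsub : I ⊆ S) (hlen : S.length ≤ I.length) : I = S := by
  have hIn : I.Nodup := hI.imp (fun h => ne_of_lt h)
  have hperm : I.Perm S := (List.subperm_of_subset hIn hsub).perm_of_length_le hlen
  exact List.Perm.eq_of_pairwise (fun a b _ _ h1 h2 => absurd h1 (lt_asymm h2)) hI hS hperm

-- ---- order facts about the combination enumeration ----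

lemma pvCombinations_pairwise (xs : List Int) (hx : xs.Pairwise (· < ·)) (r : Nat) :
    (PySem.List.combinations xs r).Pairwise (fun a b => a < b) := by
  induction xs generalizing r with
  | nil =>
    cases r with
    | zero => simp [PySem.List.combinations_zero]
    | succ r => simp [PySem.List.combinations_nil_succ]
  | cons x xs ih =>
    cases r with
    | zero => simp [PySem.List.combinations_zero]
    | succ r =>
      rw [PySem.List.combinations_cons_succ]
      rw [List.pairwise_append]
      refine ⟨?_, ih hx.of_cons (r + 1), ?_⟩
      · rw [List.pairwise_map]
        exact (ih hx.of_cons r).imp (fun h => List.cons_lt_cons_iff.mpr (Or.inr ⟨rfl, h⟩))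
      · intro a ha b hb
        obtain ⟨a', -, rfl⟩ := List.mem_map.mp ha
        obtain ⟨hbs, hbl⟩ := (PySem.List.mem_combinations_iff xs (r + 1) b).mp hb
        cases b with
        | nil => simp at hbl
        | cons y b' =>
          have hy : y ∈ xs := hbs.subset List.mem_cons_self
          exact List.cons_lt_cons_iff.mpr (Or.inl (List.rel_of_pairwise_cons hx hy))

lemma pvR_pairwise (sets : List (List Int)) : (pvR sets).Pairwise (· < ·) := by
  rw [pvR, PySem.List.len_eq, PySem.List.pyRange_zero_natCast, List.pairwise_map]
  exact (List.pairwise_lt_range).imp (fun h => by exact_mod_cast h)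

lemma pvDesc_mem (k : Nat) (j : Int) : j ∈ pvDesc k ↔ 1 ≤ j ∧ j ≤ (k : Int) := by
  induction k with
  | zero => simp [pvDesc]; omega
  | succ k ih => simp [pvDesc, ih]; omega

lemma pvCombosFrom_mem (sets : List (List Int)) (k : Nat) (S : List Int) :
    S ∈ pvCombosFrom sets k ↔ S.Sublist (pvR sets) ∧ 1 ≤ S.length ∧ S.length ≤ k := by
  rw [pvCombosFrom, List.mem_flatMap]
  constructor
  · rintro ⟨i, hi, hS⟩
    rw [pvDesc_mem] at hi
    obtain ⟨hsub, hlen⟩ := (PySem.List.mem_combinations_iff _ _ _).mp hS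
    refine ⟨hsub, by omega, by omega⟩
  · rintro ⟨hsub, h1, h2⟩
    refine ⟨(S.length : Int), ?_, ?_⟩
    · rw [pvDesc_mem]; omega
    · rw [PySem.List.mem_combinations_iff]
      exact ⟨hsub, by simp⟩

lemma pvCombosFrom_pairwise (sets : List (List Int)) (k : Nat) :
    (pvCombosFrom sets k).Pairwise (fun a b => pvKey a < pvKey b) := by
  induction k with
  | zero => simp [pvCombosFrom, pvDesc]
  | succ k ih =>
    show List.Pairwise _ ((pvDesc (k + 1)).flatMap _)
    rw [show pvDesc (k + 1) = ((k + 1 : Nat) : Int) :: pvDesc k from rfl]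
    rw [List.flatMap_cons, List.pairwise_append]
    refine ⟨?_, ih, ?_⟩
    · have hpw := pvCombinations_pairwise (pvR sets) (pvR_pairwise sets) ((k + 1 : Nat) : Int).toNat
      refine hpw.imp_of_mem ?_
      intro a b ha hb hab
      have hal := (PySem.List.mem_combinations_iff _ _ _).mp ha |>.2
      have hbl := (PySem.List.mem_combinations_iff _ _ _).mp hb |>.2
      rw [pvKey, pvKey]
      refine List.cons_lt_cons_iff.mpr (Or.inr ⟨?_, hab⟩)
      simp [PySem.List.len_eq, hal, hbl]
    · intro a ha b hb
      have hal := (PySem.List.mem_combinations_iff _ _ _).mp ha |>.2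
      have hbl := ((pvCombosFrom_mem sets k b).mp hb).2.2
      rw [pvKey, pvKey]
      refine List.cons_lt_cons_iff.mpr (Or.inl ?_)
      simp only [PySem.List.len_eq, hal]
      have : (((k + 1 : Nat) : Int)).toNat = k + 1 := by omega
      rw [this]
      push_cast
      omega

lemma pvCombosFrom_nodup (sets : List (List Int)) (k : Nat) : (pvCombosFrom sets k).Nodup := by
  refine (pvCombosFrom_pairwise sets k).imp ?_
  intro a b hab
  rintro rfl
  exact lt_irrefl _ hab

-- ---- small consequences ----

-- the filter that keeps exactly the realized signatures
def pvKeep (sets : List (List Int)) (I : List Int) : Bool := decide (pvG sets I ≠ [])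

lemma pvI_pairwise (sets : List (List Int)) (I : List Int) (h : I.Sublist (pvR sets)) :
    I.Pairwise (· < ·) := (pvR_pairwise sets).sublist h

lemma pvHead_mem (I : List Int) (hne : I ≠ []) : I.headD 0 ∈ I := by
  cases I with
  | nil => exact absurd rfl hne
  | cons a t => exact List.mem_cons_self

lemma pvBase_of_subset (sets : List (List Int)) (I : List Int) (hne : I ≠ []) (e : Int)
    (hsub : I ⊆ pvSig sets e) : e ∈ PySem.Set.ofList (pvGetI sets (I.headD 0)) := by
  rw [PySem.Set.mem_ofList]
  exact ((pvSig_mem sets e _).mp (hsub (pvHead_mem I hne))).2.2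

lemma pvG_mem (sets : List (List Int)) (S : List Int) (hne : S ≠ []) (e : Int) :
    e ∈ pvG sets S ↔ pvSig sets e = S := by
  rw [pvG, List.mem_filter]
  constructor
  · rintro ⟨-, h⟩; exact eq_of_beq h
  · rintro rfl
    exact ⟨pvBase_of_subset sets _ hne e (fun x hx => hx), by simp⟩

lemma pvLen_le_of_subset (I S : List Int) (hI : I.Pairwise (· < ·)) (hsub : I ⊆ S) :
    I.length ≤ S.length :=
  (List.subperm_of_subset (hI.imp (fun h => ne_of_lt h)) hsub).length_le

lemma pvSig_eq_of_subset (sets : List (List Int)) (I : List Int) (hIs : I.Sublist (pvR sets))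
    (e : Int) (hsub : I ⊆ pvSig sets e) (hlen : (pvSig sets e).length ≤ I.length) :
    pvSig sets e = I :=
  (pvEq_of_subset_sorted I (pvSig sets e) (pvI_pairwise sets I hIs) (pvSig_pairwise sets e)
    hsub hlen).symm

lemma pvSig_sublist (sets : List (List Int)) (e : Int) : (pvSig sets e).Sublist (pvR sets) := by
  rw [pvR, PySem.List.len_eq]
  refine pvSublist_pyRange _ _ _ (pvSig_pairwise sets e) ?_
  intro x hx
  have := (pvSig_mem sets e x).mp hx
  exact ⟨this.1, this.2.1⟩

lemma pvSig_mem_combinations (sets : List (List Int)) (e : Int) (r : Nat)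
    (hr : (pvSig sets e).length = r) :
    pvSig sets e ∈ PySem.List.combinations (pvR sets) r := by
  rw [PySem.List.mem_combinations_iff]
  exact ⟨pvSig_sublist sets e, hr⟩

-- ---- the A side ----

lemma pvFoldl_inter (s0 : List Int) (rest : List (List Int)) :
    rest.foldl (fun acc t => PySem.Set.inter acc (PySem.Set.ofList t)) s0 =
      s0.filter (fun e => rest.all (fun t => decide (e ∈ t))) := by
  induction rest generalizing s0 with
  | nil => simp
  | cons t r ih =>
    rw [List.foldl_cons, ih]
    rw [show PySem.Set.inter s0 (PySem.Set.ofList t) =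
      s0.filter (fun e => (PySem.Set.ofList t).contains e) from rfl]
    rw [List.filter_filter]
    refine List.filter_congr ?_
    intro e _
    simp [PySem.Set.mem_ofList, Bool.and_comm]

lemma pvInterAll_eq_pvW (sets : List (List Int)) (I : List Int) (hne : I ≠ [])
    (hsub : I ⊆ pvR sets) :
    pvInterAll (I.map (pvGetI sets)) = pvW sets I := by
  cases I with
  | nil => exact absurd rfl hne
  | cons i J =>
    rw [List.map_cons, show pvInterAll (pvGetI sets i :: J.map (pvGetI sets)) =
      (J.map (pvGetI sets)).foldl (fun acc t => PySem.Set.inter acc (PySem.Set.ofList t))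
        (PySem.Set.ofList (pvGetI sets i)) from rfl]
    rw [pvFoldl_inter, pvW]
    refine List.filter_congr ?_
    intro e he
    rw [PySem.Set.mem_ofList] at he
    have hbounds : ∀ j ∈ (i :: J), 0 ≤ j ∧ j < (sets.length : Int) := by
      intro j hj
      have := hsub hj
      rw [pvR, PySem.List.len_eq, PySem.List.mem_pyRange_one] at this
      exact this
    rw [List.all_map, Bool.eq_iff_iff, List.all_eq_true, decide_eq_true_iff]
    constructor
    · intro h j hj
      rcases List.mem_cons.mp hj with rfl | hj'
      · exact (pvSig_mem sets e j).mpr ⟨(hbounds j hj).1, (hbounds j hj).2, he⟩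
      · exact (pvSig_mem sets e j).mpr
          ⟨(hbounds j hj).1, (hbounds j hj).2, by simpa using h j hj'⟩
    · intro h j hj
      simpa using ((pvSig_mem sets e j).mp (h (List.mem_cons_of_mem i hj))).2.2

lemma pvFlatMap_filter_map {α β γ : Type} (L : List α) (g : α → List β) (q : β → Bool)
    (f : β → γ) :
    L.flatMap (fun i => ((g i).filter q).map f) = ((L.flatMap g).filter q).map f := by
  induction L with
  | nil => simp
  | cons a L ih => simp [List.flatMap_cons, List.filter_append, List.map_append, ih]

lemma pvRevRange (n : Nat) :
    (PySem.List.pyRange 1 ((n : Int) + 1)).reverse = pvDesc n := by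
  induction n with
  | zero =>
    show (PySem.List.pyRange 1 1).reverse = []
    decide
  | succ n ih =>
    have h1 : ((n + 1 : Nat) : Int) + 1 = ((n : Int) + 1) + 1 := by push_cast; ring
    rw [h1, PySem.List.pyRange_one_succ_right (by omega), List.reverse_append]
    rw [show pvDesc (n + 1) = ((n + 1 : Nat) : Int) :: pvDesc n from rfl, ← ih]
    simp

lemma pvA_intersections (sets : List (List Int)) :
    ((PySem.List.pyRange 1 (PySem.List.len sets + 1) 1).reverse).foldl (fun acc i =>
      (PySem.List.combinations sets i.toNat).foldl (fun acc combo =>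
        let intersect := pvInterAll combo
        if intersect ≠ [] then acc ++ [intersect] else acc) acc) [] =
    ((pvCombosAll sets).filter (fun I => decide (pvW sets I ≠ []))).map (pvW sets) := by
  rw [PySem.List.len_eq, pvRevRange]
  have hbody : ∀ (acc : List (List Int)) (i : Int), i ∈ pvDesc sets.length →
      (PySem.List.combinations sets i.toNat).foldl (fun acc combo =>
        let intersect := pvInterAll combo
        if intersect ≠ [] then acc ++ [intersect] else acc) acc =
      acc ++ ((PySem.List.combinations (pvR sets) i.toNat).filter
          (fun I => decide (pvW sets I ≠ []))).map (pvW sets) := by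
    intro acc i hi
    rw [PySem.List.foldl_append_ite (fun c => pvInterAll c ≠ []) pvInterAll]
    congr 1
    have hsets : sets = (pvR sets).map (pvGetI sets) := by
      rw [pvR]
      exact (PySem.List.map_pyGetD_pyRange_zero sets []).symm
    conv_lhs => rw [hsets]
    rw [PySem.List.combinations_map, List.filter_map, List.map_map]
    have hmem : ∀ I ∈ PySem.List.combinations (pvR sets) i.toNat,
        pvInterAll (I.map (pvGetI sets)) = pvW sets I := by
      intro I hI
      obtain ⟨hIs, hIl⟩ := (PySem.List.mem_combinations_iff _ _ _).mp hI
      have hi1 : 1 ≤ i := ((pvDesc_mem _ _).mp hi).1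
      refine pvInterAll_eq_pvW sets I ?_ hIs.subset
      intro hnil
      rw [hnil] at hIl
      simp at hIl
      omega
    rw [List.filter_congr (fun I hI => by
      simp only [Function.comp]
      rw [hmem I hI])]
    refine List.map_congr_left ?_
    intro I hI
    simp only [Function.comp]
    exact hmem I (List.mem_of_mem_filter hI)
  have hcongr := PySem.List.foldl_congr_mem
    (f := fun acc i => (PySem.List.combinations sets i.toNat).foldl (fun acc combo =>
        let intersect := pvInterAll combo
        if intersect ≠ [] then acc ++ [intersect] else acc) acc)
    (g := fun acc i =>
      acc ++ ((PySem.List.combinations (pvR sets) i.toNat).filter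
        (fun I => decide (pvW sets I ≠ []))).map (pvW sets))
    (l := pvDesc sets.length) (init := ([] : List (List Int)))
    (fun acc x hx => hbody acc x hx)
  rw [hcongr, PySem.List.foldl_append_eq_flatMap, pvFlatMap_filter_map]
  simp [pvCombosAll, pvCombosFrom]

lemma pvCombinations_nodup (sets : List (List Int)) (r : Nat) :
    (PySem.List.combinations (pvR sets) r).Nodup := by
  refine (pvCombinations_pairwise (pvR sets) (pvR_pairwise sets) r).imp ?_
  intro a b hab
  rintro rfl
  exact lt_irrefl _ hab

lemma pvBlock (sets : List (List Int)) (k : Nat) (hk : 1 ≤ k) (cs : List (List Int))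
    (hcs : ∀ I ∈ cs, I.Sublist (pvR sets) ∧ I.length = k) (hnd : cs.Nodup)
    (U : PySem.Set Int) (acc : List (List Int))
    (hU : ∀ e, e ∈ U ↔ (k + 1 ≤ (pvSig sets e).length ∨
      ((pvSig sets e).length = k ∧ pvSig sets e ∉ cs))) :
    ∃ U', cs.foldl (fun p I =>
        let intersect2 := PySem.Set.diff (pvW sets I) p.2
        if intersect2 ≠ [] then (p.1 ++ [intersect2], PySem.Set.update p.2 intersect2) else p)
        (acc, U)
      = (acc ++ ((cs.filter (pvKeep sets)).map (pvG sets)), U') ∧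
      ∀ e, e ∈ U' ↔ (k + 1 ≤ (pvSig sets e).length ∨ (pvSig sets e).length = k) := by
  induction cs generalizing U acc with
  | nil =>
    refine ⟨U, by simp, ?_⟩
    intro e
    rw [hU e]
    simp
  | cons I cs ih =>
    obtain ⟨hIs, hIl⟩ := hcs I List.mem_cons_self
    obtain ⟨hIcs, hndt⟩ := List.nodup_cons.mp hnd
    have hne : I ≠ [] := by
      intro h
      rw [h] at hIl
      simp at hIl
      omega
    -- after removing the already-used elements, the intersection for I is exactly I's group
    have hdiff : PySem.Set.diff (pvW sets I) U = pvG sets I := by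
      rw [show PySem.Set.diff (pvW sets I) U = (pvW sets I).filter (fun e => !U.contains e)
        from rfl]
      rw [pvW, pvG, List.filter_filter]
      refine List.filter_congr ?_
      intro e _
      by_cases hse : pvSig sets e = I
      · have heU : e ∉ U := by
          rw [hU e]
          rw [hse]
          simp [hIl]
        simp [hse, heU]
      · by_cases hsub' : I ⊆ pvSig sets e
        · have hlen : k + 1 ≤ (pvSig sets e).length := by
            have h1 : I.length ≤ (pvSig sets e).length :=
              pvLen_le_of_subset I _ (pvI_pairwise sets I hIs) hsub'
            rcases Nat.lt_or_ge k (pvSig sets e).length with h | h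
            · omega
            · exact absurd (pvSig_eq_of_subset sets I hIs e hsub' (by omega)) hse
          have heU : e ∈ U := (hU e).mpr (Or.inl hlen)
          simp [hse, heU, hsub']
        · simp [hse, hsub']
    simp only [List.foldl_cons, ne_eq]
    rw [hdiff]
    by_cases hG : pvG sets I = []
    · rw [if_neg (by simpa using hG)]
      have hnoe : ∀ e, pvSig sets e ≠ I := by
        intro e h
        have := (pvG_mem sets I hne e).mpr h
        rw [hG] at this
        simp at this
      have hU' : ∀ e, e ∈ U ↔ (k + 1 ≤ (pvSig sets e).length ∨
          ((pvSig sets e).length = k ∧ pvSig sets e ∉ cs)) := by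
        intro e
        rw [hU e]
        simp [List.mem_cons, hnoe e]
      obtain ⟨U', hfold, hfin⟩ := ih (fun J hJ => hcs J (List.mem_cons_of_mem I hJ)) hndt U acc hU'
      refine ⟨U', ?_, hfin⟩
      rw [hfold]
      have : pvKeep sets I = false := by simp [pvKeep, hG]
      rw [List.filter_cons_of_neg (by simp [this])]
    · rw [if_pos (by simpa using hG)]
      have hU' : ∀ e, e ∈ PySem.Set.update U (pvG sets I) ↔ (k + 1 ≤ (pvSig sets e).length ∨
          ((pvSig sets e).length = k ∧ pvSig sets e ∉ cs)) := by
        intro e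
        rw [PySem.Set.mem_update]
        constructor
        · rintro (hu | hgm)
          · rcases (hU e).mp hu with h1 | ⟨h2, h3⟩
            · exact Or.inl h1
            · exact Or.inr ⟨h2, fun hc => h3 (List.mem_cons_of_mem _ hc)⟩
          · have hse := (pvG_mem sets I hne e).mp hgm
            rw [hse]
            exact Or.inr ⟨hIl, hIcs⟩
        · rintro (h1 | ⟨h2, h3⟩)
          · exact Or.inl ((hU e).mpr (Or.inl h1))
          · by_cases hse : pvSig sets e = I
            · exact Or.inr ((pvG_mem sets I hne e).mpr hse)
            · refine Or.inl ((hU e).mpr (Or.inr ⟨h2, ?_⟩))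
              simp [List.mem_cons, hse, h3]
      obtain ⟨U', hfold, hfin⟩ := ih (fun J hJ => hcs J (List.mem_cons_of_mem I hJ)) hndt
        (PySem.Set.update U (pvG sets I)) (acc ++ [pvG sets I]) hU'
      refine ⟨U', ?_, hfin⟩
      rw [hfold]
      have : pvKeep sets I = true := by simp [pvKeep, hG]
      rw [List.filter_cons_of_pos (by simp [this])]
      simp

lemma pvOuter (sets : List (List Int)) (k : Nat) (hk : k ≤ sets.length)
    (U : PySem.Set Int) (acc : List (List Int))
    (hU : ∀ e, e ∈ U ↔ k + 1 ≤ (pvSig sets e).length) :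
    ((pvCombosFrom sets k).foldl (fun p I =>
        let intersect2 := PySem.Set.diff (pvW sets I) p.2
        if intersect2 ≠ [] then (p.1 ++ [intersect2], PySem.Set.update p.2 intersect2) else p)
        (acc, U)).1
      = acc ++ ((pvCombosFrom sets k).filter (pvKeep sets)).map (pvG sets) := by
  induction k generalizing U acc with
  | zero => simp [pvCombosFrom, pvDesc]
  | succ k ih =>
    have ht : (((k + 1 : Nat) : Int)).toNat = k + 1 := by omega
    have hsplit : pvCombosFrom sets (k + 1) =
        PySem.List.combinations (pvR sets) (k + 1) ++ pvCombosFrom sets k := by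
      rw [pvCombosFrom, show pvDesc (k + 1) = ((k + 1 : Nat) : Int) :: pvDesc k from rfl,
        List.flatMap_cons, ht]
      rfl
    rw [hsplit, List.foldl_append, List.filter_append, List.map_append]
    have hcs : ∀ I ∈ PySem.List.combinations (pvR sets) (k + 1),
        I.Sublist (pvR sets) ∧ I.length = k + 1 := by
      intro I hI
      exact (PySem.List.mem_combinations_iff _ _ _).mp hI
    have hUb : ∀ e, e ∈ U ↔ ((k + 1) + 1 ≤ (pvSig sets e).length ∨
        ((pvSig sets e).length = k + 1 ∧
          pvSig sets e ∉ PySem.List.combinations (pvR sets) (k + 1))) := by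
      intro e
      rw [hU e]
      constructor
      · intro h
        exact Or.inl h
      · rintro (h | ⟨h1, h2⟩)
        · exact h
        · exact absurd (pvSig_mem_combinations sets e (k + 1) h1) h2
    obtain ⟨U', hfold, hfin⟩ := pvBlock sets (k + 1) (by omega)
      (PySem.List.combinations (pvR sets) (k + 1)) hcs (pvCombinations_nodup sets (k + 1))
      U acc hUb
    rw [hfold]
    have hU2 : ∀ e, e ∈ U' ↔ k + 1 ≤ (pvSig sets e).length := by
      intro e
      rw [hfin e]
      omega
    rw [ih (by omega) U' _ hU2, List.append_assoc]

theorem pvA_eq (sets : List (List Int)) :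
    split_into_disjoint_sets sets =
      ((pvCombosAll sets).filter (pvKeep sets)).map (pvG sets) := by
  rw [split_into_disjoint_sets]
  rw [pvA_intersections]
  rw [List.foldl_map]
  rw [← PySem.List.foldl_ite_eq_foldl_filter (p := fun I => pvW sets I ≠ [])
    (f := fun (p : List (List Int) × PySem.Set Int) I =>
      let intersect2 := PySem.Set.diff (pvW sets I) p.2
      if intersect2 ≠ [] then (p.1 ++ [intersect2], PySem.Set.update p.2 intersect2) else p)]
  have hcongr := PySem.List.foldl_congr_mem
    (f := fun (p : List (List Int) × PySem.Set Int) I =>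
      if pvW sets I ≠ [] then
        (let intersect2 := PySem.Set.diff (pvW sets I) p.2
         if intersect2 ≠ [] then (p.1 ++ [intersect2], PySem.Set.update p.2 intersect2) else p)
      else p)
    (g := fun (p : List (List Int) × PySem.Set Int) I =>
      let intersect2 := PySem.Set.diff (pvW sets I) p.2
      if intersect2 ≠ [] then (p.1 ++ [intersect2], PySem.Set.update p.2 intersect2) else p)
    (l := pvCombosAll sets) (init := (([] : List (List Int)), PySem.Set.empty))
    ?_
  · rw [hcongr]
    have hUe : ∀ e, e ∈ (PySem.Set.empty : PySem.Set Int) ↔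
        sets.length + 1 ≤ (pvSig sets e).length := by
      intro e
      have := pvSigFrom_length 0 sets e
      rw [pvSig] at *
      constructor
      · intro h
        simp [PySem.Set.empty] at h
      · intro h
        omega
    exact pvOuter sets sets.length (le_refl _) PySem.Set.empty [] hUe
  · intro p I _
    by_cases h : pvW sets I = []
    · simp [h, PySem.Set.diff]
    · simp [h]

-- ---- the B side ----

lemma pvFilter_beq_of_nodup (l : List Int) (e : Int) (hnd : l.Nodup) :
    l.filter (fun x => x == e) = if e ∈ l then [e] else [] := by
  induction l with
  | nil => simp
  | cons a t ih =>
    obtain ⟨hat, hndt⟩ := List.nodup_cons.mp hnd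
    by_cases hae : a = e
    · subst hae
      rw [List.filter_cons_of_pos (by simp)]
      simp only [List.mem_cons, true_or, if_true]
      rw [ih hndt, if_neg hat]
    · rw [List.filter_cons_of_neg (by simp [hae]), ih hndt]
      by_cases het : e ∈ t
      · rw [if_pos het, if_pos (List.mem_cons_of_mem a het)]
      · rw [if_neg het,
          if_neg (fun h => (List.mem_cons.mp h).elim (fun h1 => hae h1.symm) het)]

lemma pvInner_getD (s : List Int) (i : Int) (d : PySem.Dict Int (List Int)) (e : Int) :
    ((PySem.Set.ofList s).foldl (fun d e => d.modify e [] (fun v => v ++ [i])) d).getD e []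
      = d.getD e [] ++ (if e ∈ s then [i] else []) := by
  have h1 : (PySem.Set.ofList s).foldl (fun d e => d.modify e [] (fun v => v ++ [i])) d
      = ((PySem.Set.ofList s).map (fun e => (e, i))).foldl
          (fun d p => d.modify p.1 [] (fun v => v ++ [p.2])) d := by
    rw [List.foldl_map]
  rw [h1, PySem.Dict.getD_foldl_modify_append]
  congr 1
  rw [List.filter_map]
  have h2 : ((fun p : Int × Int => p.1 == e) ∘ fun e => (e, i)) = fun x => x == e := rfl
  rw [h2, pvFilter_beq_of_nodup _ e (PySem.Set.nodup_ofList s)]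
  by_cases he : e ∈ s
  · rw [if_pos ((PySem.Set.mem_ofList s e).mpr he), if_pos he]
    rfl
  · rw [if_neg (fun h => he ((PySem.Set.mem_ofList s e).mp h)), if_neg he]
    rfl

lemma pvSigDict_getD (r : List (List Int)) (i0 : Int) (d : PySem.Dict Int (List Int)) (e : Int) :
    ((PySem.List.enumerate r i0).foldl (fun d is =>
        (PySem.Set.ofList is.2).foldl (fun d e => d.modify e [] (fun v => v ++ [is.1])) d)
      d).getD e []
      = d.getD e [] ++ pvSigFrom i0 r e := by
  induction r generalizing i0 d with
  | nil => simp [PySem.List.enumerate, pvSigFrom]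
  | cons s r ih =>
    rw [show PySem.List.enumerate (s :: r) i0 = (i0, s) :: PySem.List.enumerate r (i0 + 1) by
      simp [PySem.List.enumerate]]
    rw [List.foldl_cons, ih, pvInner_getD, pvSigFrom, List.append_assoc]

lemma pvUpdate_ofList (K : PySem.Set Int) (s : List Int) :
    PySem.Set.update K (PySem.Set.ofList s) = PySem.Set.update K s := by
  rw [PySem.Set.update_eq_append_filter, PySem.Set.update_eq_append_filter,
    PySem.Set.ofList_ofList]

lemma pvSigDict_keys (r : List (List Int)) (i0 : Int) (d : PySem.Dict Int (List Int)) :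
    ((PySem.List.enumerate r i0).foldl (fun d is =>
        (PySem.Set.ofList is.2).foldl (fun d e => d.modify e [] (fun v => v ++ [is.1])) d)
      d).keys
      = PySem.Set.update d.keys r.flatten := by
  induction r generalizing i0 d with
  | nil => simp [PySem.List.enumerate, PySem.Set.update]
  | cons s r ih =>
    rw [show PySem.List.enumerate (s :: r) i0 = (i0, s) :: PySem.List.enumerate r (i0 + 1) by
      simp [PySem.List.enumerate]]
    rw [List.foldl_cons, ih, PySem.Dict.keys_foldl_modify (f := fun _ _ => (fun v => v ++ [i0])),
      pvUpdate_ofList, List.flatten_cons, ← PySem.Set.update_append]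

lemma pvB_eq (sets : List (List Int)) :
    split_into_disjoint_sets_alt sets =
      (PySem.List.sorted (PySem.Set.ofList ((PySem.Set.ofList sets.flatten).map (pvSig sets))) pvKey).map
        (fun S => (PySem.Set.ofList sets.flatten).filter (fun e => pvSig sets e == S)) := by
  simp only [split_into_disjoint_sets_alt]
  set sig := (PySem.List.enumerate sets).foldl (fun d is =>
      (PySem.Set.ofList is.2).foldl (fun d e => d.modify e [] (fun v => v ++ [is.1])) d)
      (PySem.Dict.mk []) with hsig
  have hkeys : sig.keys = PySem.Set.ofList sets.flatten := by
    rw [hsig, pvSigDict_keys]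
    exact PySem.Set.update_nil_left _
  have hnd : sig.keys.Nodup := by
    rw [hkeys]
    exact PySem.Set.nodup_ofList _
  have hitems : sig.items = (PySem.Set.ofList sets.flatten).map (fun e => (e, pvSig sets e)) := by
    rw [PySem.Dict.items_eq_map_keys _ hnd []]
    rw [hkeys]
    refine List.map_congr_left ?_
    intro e _
    rw [hsig, pvSigDict_getD]
    rfl
  -- the groups dict: rewrite its building loop into the standard keyed form
  have hswap : sig.items.foldl (fun g p => g.modify p.2 [] (fun v => v ++ [p.1]))
        (PySem.Dict.mk [])
      = ((PySem.Set.ofList sets.flatten).map (fun e => (pvSig sets e, e))).foldl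
          (fun g q => g.modify q.1 [] (fun v => v ++ [q.2])) (PySem.Dict.mk []) := by
    rw [List.foldl_map, hitems, List.foldl_map]
  set groups := sig.items.foldl (fun g p => g.modify p.2 [] (fun v => v ++ [p.1]))
      (PySem.Dict.mk []) with hgroups
  have hgkeys : groups.keys = PySem.Set.ofList ((PySem.Set.ofList sets.flatten).map (pvSig sets)) := by
    rw [hswap,
      PySem.Dict.keys_foldl_modify_key (key := Prod.fst) (f := fun _ q => (fun v => v ++ [q.2]))]
    rw [show (PySem.Dict.mk [] : PySem.Dict (List Int) (List Int)).keys = [] from rfl,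
      PySem.Set.update_nil_left, List.map_map]
    rfl
  have hgget : ∀ S, groups.getD S [] =
      (PySem.Set.ofList sets.flatten).filter (fun e => pvSig sets e == S) := by
    intro S
    rw [hswap, PySem.Dict.getD_foldl_modify_append]
    rw [show (PySem.Dict.mk [] : PySem.Dict (List Int) (List Int)).getD S [] = [] from rfl]
    rw [List.nil_append, List.filter_map, List.map_map]
    rw [show ((fun p : List Int × Int => p.1 == S) ∘ fun e => (pvSig sets e, e))
      = fun e => pvSig sets e == S from rfl]
    rw [show ((fun p : List Int × Int => p.2) ∘ fun e => (pvSig sets e, e)) = id from rfl]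
    rw [List.map_id]
  rw [hgkeys]
  refine List.map_congr_left ?_
  intro S hS
  rw [hgget S]
  refine PySem.Set.ofList_eq_self_of_nodup _ ?_
  exact (PySem.Set.nodup_ofList sets.flatten).filter _

-- ---- glue ----

lemma pvRealized_iff (sets : List (List Int)) (S : List Int) :
    (∃ e, e ∈ PySem.Set.ofList sets.flatten ∧ pvSig sets e = S) ↔
      (S ∈ pvCombosFrom sets sets.length ∧ pvKeep sets S = true) := by
  constructor
  · rintro ⟨e, he, rfl⟩
    have hf : e ∈ sets.flatten := (PySem.Set.mem_ofList _ _).mp he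
    have hne : pvSig sets e ≠ [] := (pvSig_ne_nil_iff sets e).mpr hf
    have hlen : (pvSig sets e).length ≤ sets.length := pvSigFrom_length 0 sets e
    refine ⟨(pvCombosFrom_mem sets _ _).mpr
      ⟨pvSig_sublist sets e, List.length_pos_iff.mpr hne, hlen⟩, ?_⟩
    rw [pvKeep, decide_eq_true_iff]
    exact List.ne_nil_of_mem ((pvG_mem sets _ hne e).mpr rfl)
  · rintro ⟨hSc, hSk⟩
    obtain ⟨hsub, h1, h2⟩ := (pvCombosFrom_mem sets _ S).mp hSc
    have hneS : S ≠ [] := by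
      intro h
      rw [h] at h1
      simp at h1
    rw [pvKeep, decide_eq_true_iff] at hSk
    obtain ⟨e, he⟩ := List.exists_mem_of_ne_nil _ hSk
    have hse : pvSig sets e = S := (pvG_mem sets S hneS e).mp he
    refine ⟨e, ?_, hse⟩
    rw [PySem.Set.mem_ofList]
    exact (pvSig_ne_nil_iff sets e).mp (by rw [hse]; exact hneS)

lemma pvSorted_inst (xs : List (List Int)) (key : List Int → List Int) :
    @PySem.List.sorted (List Int) (List Int) List.instLT (fun a b => a.decidableLT b) xs key false
      = @PySem.List.sorted (List Int) (List Int) List.instLinearOrder.toLT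
          LinearOrder.toDecidableLT xs key false := by
  congr 1

lemma pvSorted_keys (sets : List (List Int)) :
    PySem.List.sorted (PySem.Set.ofList ((PySem.Set.ofList sets.flatten).map (pvSig sets))) pvKey =
      (pvCombosAll sets).filter (pvKeep sets) := by
  have hperm : ((pvCombosFrom sets sets.length).filter (pvKeep sets)).Perm
      (PySem.Set.ofList ((PySem.Set.ofList sets.flatten).map (pvSig sets))) := by
    rw [List.perm_ext_iff_of_nodup
      (((pvCombosFrom_nodup sets sets.length)).filter _) (PySem.Set.nodup_ofList _)]
    intro S
    rw [List.mem_filter, PySem.Set.mem_ofList, List.mem_map]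
    rw [show (∃ e ∈ PySem.Set.ofList sets.flatten, pvSig sets e = S) ↔
      (∃ e, e ∈ PySem.Set.ofList sets.flatten ∧ pvSig sets e = S) from Iff.rfl]
    rw [pvRealized_iff]
  have hpw : ((pvCombosFrom sets sets.length).filter (pvKeep sets)).Pairwise
      (fun a b => pvKey a < pvKey b) :=
    List.Pairwise.sublist List.filter_sublist (pvCombosFrom_pairwise sets sets.length)
  rw [pvSorted_inst]
  exact PySem.List.sorted_eq_of_perm_of_pairwise_lt _ _ pvKey hperm hpw

lemma pvHeadD_min (S : List Int) (hS : S.Pairwise (· < ·)) :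
    ∀ j ∈ S, S.headD 0 ≤ j := by
  cases S with
  | nil => intro j hj; simp at hj
  | cons a t =>
    intro j hj
    rcases List.mem_cons.mp hj with rfl | hj'
    · exact le_refl _
    · exact le_of_lt (List.rel_of_pairwise_cons hS hj')

lemma pvFilter_ofList_mid (p : Int → Bool) (pre mid post : List Int)
    (h1 : ∀ e, p e = true → e ∉ pre) (h2 : ∀ e, p e = true → e ∈ mid) :
    (PySem.Set.ofList (pre ++ (mid ++ post))).filter p = (PySem.Set.ofList mid).filter p := by
  rw [PySem.Set.ofList_append, PySem.Set.update_eq_append_filter, List.filter_append]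
  have hpre : (PySem.Set.ofList pre).filter p = [] := by
    rw [List.filter_eq_nil_iff]
    intro a ha hpa
    exact h1 a hpa ((PySem.Set.mem_ofList pre a).mp ha)
  rw [hpre, List.nil_append, List.filter_filter]
  have hstep : (PySem.Set.ofList (mid ++ post)).filter
      (fun a => p a && !(PySem.Set.ofList pre).contains a)
      = (PySem.Set.ofList (mid ++ post)).filter p := by
    refine List.filter_congr ?_
    intro a _
    cases hpa : p a
    · simp
    · have hnp : a ∉ pre := h1 a hpa
      have hcf : (PySem.Set.ofList pre).contains a = false := by
        cases hc : (PySem.Set.ofList pre).contains a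
        · rfl
        · exact absurd ((PySem.Set.mem_ofList pre a).mp
            ((PySem.Set.contains_iff _ a).mp hc)) hnp
      rw [hcf]
      rfl
  rw [hstep, PySem.Set.ofList_append, PySem.Set.update_eq_append_filter, List.filter_append]
  have hpost : ((PySem.Set.ofList post).filter
      (fun y => !(PySem.Set.ofList mid).contains y)).filter p = [] := by
    rw [List.filter_eq_nil_iff]
    intro a ha hpa
    have := (List.mem_filter.mp ha).2
    have hnm : a ∉ mid := by
      intro hm
      rw [(PySem.Set.contains_iff _ a).mpr ((PySem.Set.mem_ofList mid a).mpr hm)] at this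
      simp at this
    exact hnm (h2 a hpa)
  rw [hpost, List.append_nil]

lemma pvEntry_eq (sets : List (List Int)) (S : List Int)
    (hS : S ∈ (pvCombosAll sets).filter (pvKeep sets)) :
    (PySem.Set.ofList sets.flatten).filter (fun e => pvSig sets e == S) = pvG sets S := by
  obtain ⟨hSc, hSk⟩ := List.mem_filter.mp hS
  obtain ⟨hsub, h1, h2⟩ := (pvCombosFrom_mem sets _ S).mp hSc
  have hneS : S ≠ [] := by
    intro h
    rw [h] at h1
    simp at h1
  have hhS : S.headD 0 ∈ S := pvHead_mem S hneS
  have hb : 0 ≤ S.headD 0 ∧ S.headD 0 < (sets.length : Int) := by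
    have := hsub.subset hhS
    rw [pvR, PySem.List.len_eq, PySem.List.mem_pyRange_one] at this
    exact this
  have hh' : (S.headD 0).toNat < sets.length := by omega
  have hgetI : pvGetI sets (S.headD 0) = sets[(S.headD 0).toNat] :=
    PySem.List.pyGetD_eq_getElem sets [] hb.1 hb.2
  have hdecomp : sets.flatten =
      (sets.take (S.headD 0).toNat).flatten ++
        (sets[(S.headD 0).toNat] ++ (sets.drop ((S.headD 0).toNat + 1)).flatten) := by
    conv_lhs => rw [← List.take_append_drop (S.headD 0).toNat sets]
    rw [List.flatten_append, List.drop_eq_getElem_cons hh', List.flatten_cons]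
  rw [hdecomp, pvFilter_ofList_mid, pvG, hgetI]
  · intro e hpe
    have hse : pvSig sets e = S := eq_of_beq hpe
    rw [List.mem_flatten]
    rintro ⟨t, ht, het⟩
    obtain ⟨j, hj, rfl⟩ := List.mem_iff_getElem.mp ht
    have hjlen : j < sets.length := by
      have := hj
      rw [List.length_take] at this
      omega
    rw [List.getElem_take] at het
    have hjS : (j : Int) ∈ S := by
      rw [← hse, pvSig_mem]
      refine ⟨by omega, by omega, ?_⟩
      rw [pvGetI, PySem.List.pyGetD_natCast]
      simpa [List.getD_eq_getElem?_getD, List.getElem?_eq_getElem hjlen] using het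
    have := pvHeadD_min S (pvI_pairwise sets S hsub) _ hjS
    have hjlt : j < (S.headD 0).toNat := by
      have := hj
      rw [List.length_take] at this
      omega
    omega
  · intro e hpe
    have hse : pvSig sets e = S := eq_of_beq hpe
    have : e ∈ pvGetI sets (S.headD 0) := by
      have := (pvSig_mem sets e (S.headD 0)).mp (by rw [hse]; exact hhS)
      exact this.2.2
    rw [hgetI] at this
    exact this

-- ===== VERDICT (by name: the statement is the Claim_ definition above) =====
theorem split_into_disjoint_sets_spec : Claim_equal_split_into_disjoint_sets := by
  intro sets _
  unfold Spec_split_into_disjoint_sets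
  rw [pvA_eq, pvB_eq, pvSorted_keys]
  exact (List.map_congr_left (fun S hS => pvEntry_eq sets S hS)).symm
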